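-- pv_equiv track=rewrite | github.com/thealper2/codewars-solutions | 7-kyu/find_the_vowels.py | vowel_indices
-- ===== SOURCE A (Python) =====
-- def vowel_indices(word):
--     n = len(word)
--     vowels = {"a", "e", "i", "o", "u", "y"}
--     result = []
--
--     for i in range(n):
--         if word[i].lower() in vowels:
--             result.append(i + 1)
--
--     return result
-- ===== SOURCE B (Python) =====
-- def vowel_indices(word):
--     hits = []
--     for v in "aeiouyAEIOUY":
--         for i, c in enumerate(word, 1):
--             if c == v:
--                 hits.append(i)
--     hits.sort()
--     return hits
-- ===== Notes on version B (the rewrite author's own statement) =====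
-- stated objective: alternative
-- what changed: Instead of one left-to-right scan testing each lowered character against a vowel set, B makes a staged pass per vowel letter (12 scans, exact character comparison, no lower() and no set), collects all hit positions grouped by vowel, and sorts them at the end to restore positional order.
import Mathlib
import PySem

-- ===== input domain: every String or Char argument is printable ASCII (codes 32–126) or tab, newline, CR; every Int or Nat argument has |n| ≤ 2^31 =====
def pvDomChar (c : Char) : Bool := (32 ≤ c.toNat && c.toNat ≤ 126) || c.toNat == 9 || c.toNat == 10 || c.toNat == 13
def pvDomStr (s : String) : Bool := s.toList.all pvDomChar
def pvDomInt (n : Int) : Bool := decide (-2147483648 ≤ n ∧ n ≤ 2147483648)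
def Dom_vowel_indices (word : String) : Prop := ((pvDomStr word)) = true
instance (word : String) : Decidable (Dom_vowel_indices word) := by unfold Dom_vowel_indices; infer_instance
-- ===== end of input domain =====

-- B replaces A's single scan (per-character lower() + set membership) by one staged
-- scan per vowel letter, collecting hit positions grouped by vowel and sorting at
-- the end to restore positional order; an alternative algorithm, not claimed faster.

-- ===== PORT A =====
-- word[i] is a single character, so word[i].lower() in {"a",…} is ported exactly
-- at character level as lowerChar with membership in the same set.
def vowel_indices (word : String) : List Int :=
  let n := PySem.Str.len word
  let vowels : PySem.Set Char := PySem.Set.ofList ['a', 'e', 'i', 'o', 'u', 'y']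
  (PySem.List.pyRange 0 n 1).foldl
    (fun result i =>
      if vowels.contains (PySem.Chars.lowerChar (PySem.List.pyGetD word.toList i 'a')) then
        result ++ [i + 1]
      else
        result) []

-- ===== PORT B =====
-- the inner 'for i, c in enumerate(word, 1): if c == v: hits.append(i)' loop is
-- transcribed as a filterMap over the enumerated characters, appended per vowel.
def vowel_indices_alt (word : String) : List Int :=
  let hits : List Int :=
    "aeiouyAEIOUY".toList.foldl
      (fun hits v =>
        hits ++ (PySem.List.enumerate word.toList 1).filterMap
          (fun p => if p.2 = v then some p.1 else none)) []
  PySem.List.sorted hits (fun x => x) false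

-- ===== PRECONDITION & SPEC =====
def Spec_vowel_indices (word : String) (out : List Int) : Prop := out = vowel_indices_alt word
instance (word : String) (out : List Int) : Decidable (Spec_vowel_indices word out) := by unfold Spec_vowel_indices; infer_instance

-- ===== CLAIM (what is proved, stated in full; the proofs are below) =====
def Claim_equal_vowel_indices : Prop := ∀ (word : String), Dom_vowel_indices word → Spec_vowel_indices word (vowel_indices word)

-- ===== LEMMAS AND PROOFS =====

-- occurrence positions of v in an enumerated list
def pvOcc (l : List (Int × Char)) (v : Char) : List Int :=
  l.filterMap (fun p => if p.2 = v then some p.1 else none)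

theorem char_eq_iff_toNat (c d : Char) : c = d ↔ c.toNat = d.toNat := by
  constructor
  · rintro rfl; rfl
  · intro h; apply Char.ext; unfold Char.toNat at h; exact UInt32.toNat_inj.mp h

theorem lowerChar_vowel (c : Char) :
    (PySem.Chars.lowerChar c ∈ (['a','e','i','o','u','y'] : List Char)) ↔
    c ∈ (['a','e','i','o','u','y','A','E','I','O','U','Y'] : List Char) := by
  simp only [PySem.Chars.lowerChar, PySem.Chars.isupper, List.mem_cons, List.not_mem_nil, or_false]
  by_cases h : 'A' ≤ c ∧ c ≤ 'Z'
  · rw [if_pos (by simp [h.1, h.2])]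
    have h1 : 65 ≤ c.toNat := by have := h.1; simp [Char.le_def] at this; exact_mod_cast this
    have h2 : c.toNat ≤ 90 := by have := h.2; simp [Char.le_def] at this; exact_mod_cast this
    have hofNat : (Char.ofNat (c.toNat + 32)).toNat = c.toNat + 32 := by
      rw [Char.toNat_ofNat]; simp [Nat.isValidChar]; omega
    simp only [char_eq_iff_toNat, hofNat]
    constructor
    · intro hh; rcases hh with hh|hh|hh|hh|hh|hh <;> simp_all
    · intro hh; rcases hh with hh|hh|hh|hh|hh|hh|hh|hh|hh|hh|hh|hh <;> simp_all
  · rw [if_neg (by simp only [Bool.and_eq_true, decide_eq_true_eq]; exact fun hh => h ⟨hh.1, hh.2⟩)]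
    have h1 : ¬(65 ≤ c.toNat ∧ c.toNat ≤ 90) := by
      intro hh
      apply h
      refine ⟨?_, ?_⟩
      · rw [Char.le_def, UInt32.le_iff_toNat_le]; exact hh.1
      · rw [Char.le_def, UInt32.le_iff_toNat_le]; exact hh.2
    simp only [char_eq_iff_toNat]
    constructor
    · intro hh; rcases hh with hh|hh|hh|hh|hh|hh <;> simp_all
    · intro hh; rcases hh with hh|hh|hh|hh|hh|hh|hh|hh|hh|hh|hh|hh <;> simp_all

-- A's foldl produces the filterMap over the enumerated characters
theorem A_eq_canon (cs : List Char) :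
    (PySem.List.pyRange 0 (cs.length : Int) 1).foldl
      (fun result i =>
        if (PySem.Set.ofList ['a', 'e', 'i', 'o', 'u', 'y']).contains
            (PySem.Chars.lowerChar (PySem.List.pyGetD cs i 'a')) then
          result ++ [i + 1]
        else
          result) []
    = (PySem.List.enumerate cs 1).filterMap
        (fun p => if (PySem.Set.ofList ['a', 'e', 'i', 'o', 'u', 'y']).contains
            (PySem.Chars.lowerChar p.2) then some p.1 else none) := by
  induction cs using List.reverseRecOn with
  | nil => decide
  | append_singleton cs c ih =>
    have hlen : ((cs ++ [c]).length : Int) = (cs.length : Int) + 1 := by simp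
    rw [hlen, PySem.List.pyRange_one_succ_right (by positivity), List.foldl_append]
    have hcongr :
        (PySem.List.pyRange 0 (cs.length : Int) 1).foldl
          (fun result i =>
            if (PySem.Set.ofList ['a', 'e', 'i', 'o', 'u', 'y']).contains
                (PySem.Chars.lowerChar (PySem.List.pyGetD (cs ++ [c]) i 'a')) then
              result ++ [i + 1]
            else
              result) []
        = (PySem.List.pyRange 0 (cs.length : Int) 1).foldl
          (fun result i =>
            if (PySem.Set.ofList ['a', 'e', 'i', 'o', 'u', 'y']).contains
                (PySem.Chars.lowerChar (PySem.List.pyGetD cs i 'a')) then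
              result ++ [i + 1]
            else
              result) [] := by
      apply PySem.List.foldl_congr_mem
      intro acc i hi
      have hb := (PySem.List.mem_pyRange_one.mp hi)
      have hget : PySem.List.pyGetD (cs ++ [c]) i 'a' = PySem.List.pyGetD cs i 'a' := by
        rw [PySem.List.pyGetD_eq_getElem (cs ++ [c]) 'a' hb.1 (by simp; omega),
            PySem.List.pyGetD_eq_getElem cs 'a' hb.1 (by simpa using hb.2)]
        rw [List.getElem_append_left]
      rw [hget]
    rw [hcongr, ih]
    have hlast : PySem.List.pyGetD (cs ++ [c]) (cs.length : Int) 'a' = c := by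
      rw [PySem.List.pyGetD_eq_getElem (cs ++ [c]) 'a' (by positivity) (by simp)]
      simp
    simp only [List.foldl_cons, List.foldl_nil]
    rw [hlast, PySem.List.enumerate_append, List.filterMap_append]
    have hlen2 : (1 : Int) + cs.length = (cs.length : Int) + 1 := by ring
    rw [hlen2]
    simp only [PySem.List.enumerate, List.filterMap_cons, List.filterMap_nil]
    by_cases hc : (PySem.Set.ofList ['a', 'e', 'i', 'o', 'u', 'y']).contains
        (PySem.Chars.lowerChar c) = true
    · have hc' : PySem.Chars.lowerChar c = 'a' ∨ PySem.Chars.lowerChar c = 'e' ∨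
          PySem.Chars.lowerChar c = 'i' ∨ PySem.Chars.lowerChar c = 'o' ∨
          PySem.Chars.lowerChar c = 'u' ∨ PySem.Chars.lowerChar c = 'y' := by simpa using hc
      rw [if_pos hc, if_pos hc]
    · have hc' : ¬(PySem.Chars.lowerChar c = 'a' ∨ PySem.Chars.lowerChar c = 'e' ∨
          PySem.Chars.lowerChar c = 'i' ∨ PySem.Chars.lowerChar c = 'o' ∨
          PySem.Chars.lowerChar c = 'u' ∨ PySem.Chars.lowerChar c = 'y') := by simpa using hc
      rw [if_neg hc, if_neg hc]
      simp

-- the filterMap positions form a sublist of the first components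
theorem filterMap_sublist_map_fst (l : List (Int × Char)) (P : (Int × Char) → Bool) :
    (l.filterMap (fun p => if P p then some p.1 else none)).Sublist (l.map (·.1)) := by
  induction l with
  | nil => simp
  | cons p l ih =>
    simp only [List.filterMap_cons, List.map_cons]
    by_cases h : P p = true
    · simp only [h, if_true]
      exact List.Sublist.cons₂ _ ih
    · simp only [Bool.not_eq_true] at h
      simp only [h]
      exact List.Sublist.cons _ ih

theorem canon_pairwise (cs : List Char) (s : Int) (P : (Int × Char) → Bool) :
    ((PySem.List.enumerate cs s).filterMap
      (fun p => if P p then some p.1 else none)).Pairwise (· < ·) := by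
  apply List.Pairwise.sublist (filterMap_sublist_map_fst _ _)
  rw [List.pairwise_map]
  exact PySem.List.pairwise_lt_enumerate _ _

-- one cons step of the enumerated list, pushed through the per-vowel flatMap
theorem pvOcc_cons (i : Int) (c : Char) (l : List (Int × Char)) (v : Char) :
    pvOcc ((i, c) :: l) v = if c = v then i :: pvOcc l v else pvOcc l v := by
  simp only [pvOcc, List.filterMap_cons]
  by_cases h : c = v <;> simp [h]

theorem flatMap_occ_cons (V : List Char) (hV : V.Nodup) (i : Int) (c : Char)
    (l : List (Int × Char)) :
    (V.flatMap (fun v => pvOcc ((i, c) :: l) v)).Perm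
      ((if c ∈ V then [i] else []) ++ V.flatMap (fun v => pvOcc l v)) := by
  induction V with
  | nil => simp
  | cons v V ihV =>
    have hVn : V.Nodup := (List.nodup_cons.mp hV).2
    have hvV : v ∉ V := (List.nodup_cons.mp hV).1
    simp only [List.flatMap_cons, pvOcc_cons]
    by_cases hcv : c = v
    · subst hcv
      have hcV : c ∉ V := hvV
      have hrest : V.flatMap (fun u => if c = u then i :: pvOcc l u else pvOcc l u)
          = V.flatMap (fun u => pvOcc l u) := by
        apply List.flatMap_congr
        intro u hu
        have : c ≠ u := fun h => hcV (h ▸ hu)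
        simp [this]
      rw [if_pos rfl, hrest, if_pos (List.mem_cons_self)]
      simp
    · have hmem : (c ∈ v :: V) ↔ (c ∈ V) := by simp [hcv]
      rw [if_neg hcv]
      have step : (pvOcc l v ++ V.flatMap (fun u => if c = u then i :: pvOcc l u else pvOcc l u)).Perm
          (pvOcc l v ++ ((if c ∈ V then [i] else []) ++ V.flatMap (fun u => pvOcc l u))) := by
        apply List.Perm.append_left
        have := ihV hVn
        simpa [pvOcc_cons] using this
      refine step.trans ?_
      by_cases hcV : c ∈ V
      · rw [if_pos hcV, if_pos (hmem.mpr hcV)]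
        simpa using (List.perm_middle (a := i) (l₁ := pvOcc l v)
          (l₂ := V.flatMap (fun u => pvOcc l u))).symm
      · rw [if_neg hcV, if_neg (fun h => hcV (hmem.mp h))]
        simp

theorem flatMap_occ_perm (V : List Char) (hV : V.Nodup) (l : List (Int × Char)) :
    (V.flatMap (fun v => pvOcc l v)).Perm
      (l.filterMap (fun p => if p.2 ∈ V then some p.1 else none)) := by
  induction l with
  | nil => simp [pvOcc]
  | cons p l ih =>
    have step := flatMap_occ_cons V hV p.1 p.2 l
    rw [List.filterMap_cons]
    by_cases hp : p.2 ∈ V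
    · simp only [hp, if_pos]
      refine ((by simpa [hp] using step : (V.flatMap (fun v => pvOcc (p :: l) v)).Perm
        (p.1 :: V.flatMap (fun v => pvOcc l v)))).trans ?_
      exact (ih).cons p.1
    · simp only [hp, if_false]
      refine ((by simpa [hp] using step : (V.flatMap (fun v => pvOcc (p :: l) v)).Perm
        (V.flatMap (fun v => pvOcc l v)))).trans ih

-- the canonical answer: positions of the 12 vowel letters, in positional order
theorem canon_eq_canon2 (cs : List Char) :
    (PySem.List.enumerate cs 1).filterMap
        (fun p => if (PySem.Set.ofList ['a', 'e', 'i', 'o', 'u', 'y']).contains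
            (PySem.Chars.lowerChar p.2) then some p.1 else none)
    = (PySem.List.enumerate cs 1).filterMap
        (fun p => if p.2 ∈ (['a','e','i','o','u','y','A','E','I','O','U','Y'] : List Char)
          then some p.1 else none) := by
  apply List.filterMap_congr
  intro p _
  by_cases hp : p.2 ∈ (['a','e','i','o','u','y','A','E','I','O','U','Y'] : List Char)
  · rw [if_pos (by simpa using (lowerChar_vowel p.2).mpr hp), if_pos hp]
  · rw [if_neg (fun h => hp ((lowerChar_vowel p.2).mp (by simpa using h))), if_neg hp]

theorem vowel_indices_eq_alt (word : String) :
    vowel_indices word = vowel_indices_alt word := by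
  unfold vowel_indices vowel_indices_alt
  have hlen : PySem.Str.len word = (word.toList.length : Int) := by simp
  rw [hlen, A_eq_canon word.toList, canon_eq_canon2]
  have hV : "aeiouyAEIOUY".toList = (['a','e','i','o','u','y','A','E','I','O','U','Y'] : List Char) := by decide
  rw [hV, PySem.List.foldl_append_eq_flatMap, List.nil_append]
  have hperm : ((PySem.List.enumerate word.toList 1).filterMap
      (fun p => if p.2 ∈ (['a','e','i','o','u','y','A','E','I','O','U','Y'] : List Char)
        then some p.1 else none)).Perm
      ((['a','e','i','o','u','y','A','E','I','O','U','Y'] : List Char).flatMap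
        (fun v => (PySem.List.enumerate word.toList 1).filterMap
          (fun p => if p.2 = v then some p.1 else none))) := by
    exact (flatMap_occ_perm _ (by decide) _).symm
  have hpair : ((PySem.List.enumerate word.toList 1).filterMap
      (fun p => if p.2 ∈ (['a','e','i','o','u','y','A','E','I','O','U','Y'] : List Char)
        then some p.1 else none)).Pairwise (fun a b => (fun x => x) a < (fun x => x) b) := by
    have h := canon_pairwise word.toList 1
      (fun p => decide (p.2 ∈ (['a','e','i','o','u','y','A','E','I','O','U','Y'] : List Char)))
    simpa [decide_eq_true_eq] using h
  exact (PySem.List.sorted_eq_of_perm_of_pairwise_lt _ _ (fun x => x) hperm hpair).symm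

-- ===== VERDICT (by name: the statement is the Claim_ definition above) =====
theorem vowel_indices_spec : Claim_equal_vowel_indices := by
  intro word _
  exact vowel_indices_eq_alt word
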